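-- pv_equiv track=rewrite | github.com/ElchaabiMohamed/InferCode_SVM | NC-5690-python-files/program_3710.py | permutationChaine
-- ===== SOURCE A (Python) =====
-- def permutationChaine(s):
--   res=''
--   for i in range(0,len(s)-1,2):
--     res+=s[i+1]
--     res+=s[i]
--   if len(s)%2!=0:
--     res+=s[-1]
--   return res
-- ===== SOURCE B (Python) =====
-- def permutationChaine(s):
--     out = []
--     pending = None
--     for c in s:
--         if pending is None:
--             pending = c
--         else:
--             out.append(c)
--             out.append(pending)
--             pending = None
--     if pending is not None:
--         out.append(pending)
--     return ''.join(out)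
-- ===== Notes on version B (the rewrite author's own statement) =====
-- stated objective: faster
-- what changed: Replaces A's index-arithmetic loop over range(0, len(s)-1, 2) with quadratic string concatenation by a single index-free pass that folds over the characters with a pending-character state and joins a list once at the end.
import Mathlib
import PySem

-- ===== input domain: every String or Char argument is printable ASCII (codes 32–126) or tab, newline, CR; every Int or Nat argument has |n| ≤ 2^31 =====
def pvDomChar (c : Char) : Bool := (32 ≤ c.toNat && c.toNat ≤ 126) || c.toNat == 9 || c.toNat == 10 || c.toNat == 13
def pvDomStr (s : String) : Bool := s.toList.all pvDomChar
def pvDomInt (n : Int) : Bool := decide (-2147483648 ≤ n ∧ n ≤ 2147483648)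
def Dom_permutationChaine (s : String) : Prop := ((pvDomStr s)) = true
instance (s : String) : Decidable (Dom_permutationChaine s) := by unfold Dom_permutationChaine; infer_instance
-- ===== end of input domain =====

-- B swaps adjacent characters in one index-free pass with a pending-character state
-- instead of A's index loop over range(0, len(s)-1, 2) with quadratic concatenation; objective: faster.

-- ===== PORT A =====
-- literal port of A's loop: res += s[i+1]; res += s[i] over range(0, len(s)-1, 2),
-- then the odd-length tail s[-1]. Indices are always in range, so .getD ' ' never fires.
def permutationChaine (s : String) : String :=
  let cs := s.toList
  let res : List Char :=
    (PySem.List.pyRange 0 ((cs.length : Int) - 1) 2).foldl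
      (fun res i =>
        (res ++ [(PySem.List.pyGet? cs (i + 1)).getD ' '])
          ++ [(PySem.List.pyGet? cs i).getD ' ']) []
  let res :=
    if (cs.length : Int) % 2 ≠ 0 then res ++ [(PySem.List.pyGet? cs (-1)).getD ' ']
    else res
  String.ofList res

-- ===== PORT B =====
-- Source B: fold over the characters; a pending char is swapped behind the next one,
-- a leftover pending char (odd length) is appended; join once at the end.
def pvStep (acc : List Char × Option Char) (c : Char) : List Char × Option Char :=
  match acc.2 with
  | none => (acc.1, some c)
  | some p => (acc.1 ++ [c, p], none)

def permutationChaine_alt (s : String) : String :=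
  let r := s.toList.foldl pvStep ([], none)
  let out := match r.2 with
    | some p => r.1 ++ [p]
    | none => r.1
  String.ofList out

-- ===== PRECONDITION & SPEC =====
def Spec_permutationChaine (s : String) (out : String) : Prop := out = permutationChaine_alt s
instance (s : String) (out : String) : Decidable (Spec_permutationChaine s out) := by unfold Spec_permutationChaine; infer_instance

-- ===== CLAIM (what is proved, stated in full; the proofs are below) =====
def Claim_equal_permutationChaine : Prop := ∀ (s : String), Dom_permutationChaine s → Spec_permutationChaine s (permutationChaine s)

-- ===== LEMMAS AND PROOFS =====

-- proof-side intermediate form: pairwise swap by structural recursion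
def pvAltGo : List Char → List Char
  | a :: b :: rest => b :: a :: pvAltGo rest
  | short => short

-- B's fold threads the accumulator: starting output concatenates on the left
theorem pvFold_shift (cs : List Char) (out : List Char) :
    cs.foldl pvStep (out, none)
      = (out ++ (cs.foldl pvStep ([], none)).1, (cs.foldl pvStep ([], none)).2) := by
  induction cs using pvAltGo.induct generalizing out with
  | case1 a b rest ih =>
    simp only [List.foldl_cons, pvStep, List.nil_append]
    rw [ih (out ++ [b, a]), ih [b, a]]
    simp
  | case2 short h =>
    match short, h with
    | [], _ => simp
    | [c], _ => simp [pvStep]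
    | a :: b :: rest, h => exact absurd (h a b rest rfl) not_false

-- B's fold (with its odd-leftover fixup) computes the pairwise swap
theorem pvFold_eq (cs : List Char) :
    (match (cs.foldl pvStep ([], none)).2 with
      | some p => (cs.foldl pvStep ([], none)).1 ++ [p]
      | none => (cs.foldl pvStep ([], none)).1)
      = pvAltGo cs := by
  induction cs using pvAltGo.induct with
  | case1 a b rest ih =>
    simp only [List.foldl_cons, pvStep, List.nil_append]
    rw [pvFold_shift rest [b, a]]
    cases hq : (rest.foldl pvStep ([], none)).2 with
    | none =>
      simp only [hq] at ih ⊢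
      simp [pvAltGo, ih]
    | some p =>
      simp only [hq] at ih ⊢
      simp [pvAltGo, ← ih]
  | case2 short h =>
    match short, h with
    | [], _ => simp [pvAltGo]
    | [c], _ => simp [pvStep, pvAltGo]
    | a :: b :: rest, h => exact absurd (h a b rest rfl) not_false

-- A's range(0, len-1, 2) is 2*k for k < len/2
theorem pvRange_two (L : Nat) :
    PySem.List.pyRange 0 ((L : Int) - 1) 2
      = (List.range (L / 2)).map (fun k : Nat => (2 * (k : Int))) := by
  rw [PySem.List.pyRange_of_pos 0 ((L : Int) - 1) (by norm_num)]
  have hc : (if (0 : Int) < (L : Int) - 1 then ((((L : Int) - 1) - 0 + 2 - 1) / 2).toNat else 0)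
      = L / 2 := by
    split_ifs with h
    · omega
    · omega
  rw [hc]
  simp

-- A's flatMap core equals B's recursion plus the odd tail
theorem pvCore_eq (cs : List Char) :
    (List.range (cs.length / 2)).flatMap
        (fun k : Nat => [(PySem.List.pyGet? cs (2 * (k : Int) + 1)).getD ' ',
                   (PySem.List.pyGet? cs (2 * (k : Int))).getD ' '])
      ++ (if (cs.length : Int) % 2 ≠ 0 then [(PySem.List.pyGet? cs (-1)).getD ' '] else [])
      = pvAltGo cs := by
  induction cs using pvAltGo.induct with
  | case1 a b rest ih =>
    have hlen : (a :: b :: rest).length / 2 = rest.length / 2 + 1 := by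
      simp; omega
    rw [hlen, List.range_succ_eq_map, List.flatMap_cons, List.flatMap_map]
    have hget : ∀ (k : Nat),
        [(PySem.List.pyGet? (a :: b :: rest) (2 * ((Nat.succ k : Nat) : Int) + 1)).getD ' ',
         (PySem.List.pyGet? (a :: b :: rest) (2 * ((Nat.succ k : Nat) : Int))).getD ' ']
        = [(PySem.List.pyGet? rest (2 * (k : Int) + 1)).getD ' ',
           (PySem.List.pyGet? rest (2 * (k : Int))).getD ' '] := by
      intro k
      have h1 : (2 * ((Nat.succ k : Nat) : Int) + 1) = ((2 * k + 3 : Nat) : Int) := by push_cast; ring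
      have h2 : (2 * ((Nat.succ k : Nat) : Int)) = ((2 * k + 2 : Nat) : Int) := by push_cast; ring
      have h3 : (2 * (k : Int) + 1) = ((2 * k + 1 : Nat) : Int) := by push_cast; ring
      have h4 : (2 * (k : Int)) = ((2 * k : Nat) : Int) := by push_cast; ring
      rw [h1, h2, h3, h4, PySem.List.pyGet?_natCast, PySem.List.pyGet?_natCast,
        PySem.List.pyGet?_natCast, PySem.List.pyGet?_natCast]
      simp [List.getElem?_cons_succ]
    have hodd : ((a :: b :: rest).length : Int) % 2 = (rest.length : Int) % 2 := by
      simp; omega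
    have hlast : rest ≠ [] →
        (PySem.List.pyGet? (a :: b :: rest) (-1)).getD ' '
          = (PySem.List.pyGet? rest (-1)).getD ' ' := by
      intro hne
      simp [PySem.List.pyGet?, PySem.List.pyIdx?]
      rcases Nat.exists_eq_succ_of_ne_zero (by simpa [List.length_eq_zero_iff] using hne :
          rest.length ≠ 0) with ⟨m, hm⟩
      simp [hm]
    have hp0 : [(PySem.List.pyGet? (a :: b :: rest) (2 * ((0 : Nat) : Int) + 1)).getD ' ',
                (PySem.List.pyGet? (a :: b :: rest) (2 * ((0 : Nat) : Int))).getD ' '] = [b, a] := by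
      rw [show (2 * ((0 : Nat) : Int) + 1) = ((1 : Nat) : Int) by norm_num,
        show (2 * ((0 : Nat) : Int)) = ((0 : Nat) : Int) by norm_num,
        PySem.List.pyGet?_natCast, PySem.List.pyGet?_natCast]
      simp
    rw [hp0]
    simp only [hget, hodd]
    by_cases hrest : rest = []
    · subst hrest; simp [pvAltGo]
    · rw [hlast hrest, List.append_assoc, ih]
      simp [pvAltGo]
  | case2 short h =>
    match short, h with
    | [], _ => simp [pvAltGo]
    | [c], _ =>
      simp [pvAltGo, PySem.List.pyGet?, PySem.List.pyIdx?]
    | a :: b :: rest, h => exact absurd (h a b rest rfl) not_false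

theorem pvIfAppend (c : Prop) [Decidable c] (r t : List Char) :
    (if c then r ++ t else r) = r ++ (if c then t else []) := by
  split <;> simp

theorem pvMain (s : String) : permutationChaine s = permutationChaine_alt s := by
  unfold permutationChaine permutationChaine_alt
  dsimp only
  congr 1
  rw [pvRange_two, List.foldl_map]
  simp only [List.append_assoc, List.singleton_append]
  rw [PySem.List.foldl_append_eq_flatMap
      (fun k : Nat => [(PySem.List.pyGet? s.toList (2 * (k : Int) + 1)).getD ' ',
                       (PySem.List.pyGet? s.toList (2 * (k : Int))).getD ' ']), List.nil_append,
    pvIfAppend]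
  rw [pvCore_eq s.toList, ← pvFold_eq s.toList]

-- ===== VERDICT (by name: the statement is the Claim_ definition above) =====
theorem permutationChaine_spec : Claim_equal_permutationChaine := by
  intro s _
  unfold Spec_permutationChaine
  exact pvMain s
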